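-- pv_equiv track=rewrite | github.com/roleyguacamole/AdventOfCode | Y2015 D08.py | totalDiff
-- ===== SOURCE A (Python) =====
-- def codeMinusString(string):
--     if string[-1] == "\n":
--         codeLength = len(string) - 1
--     else:
--         codeLength = len(string)
--     strLen = 0
--     encodeLength = 0
--     codeIndex = 1
--     encodeIndex = 0
--     while encodeIndex < codeLength:
--         if codeIndex < codeLength - 1:
--             if string[codeIndex] == '\\':
--                 if string[codeIndex + 1] == 'x':
--                     codeIndex += 4
--                 else:
--                     codeIndex += 2
--             else:
--                 codeIndex += 1
--             strLen += 1
--         if string[encodeIndex] == "\"":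
--             if encodeIndex == 0 or encodeIndex == codeLength - 1:
--                 encodeLength += 3
--             else:
--                 encodeLength += 2
--         elif string[encodeIndex] == "\\":
--             encodeLength += 2
--         else:
--             encodeLength += 1
--         encodeIndex += 1
--     return codeLength - strLen , encodeLength - codeLength
--
-- def totalDiff(inputStrings):
--     codeMinus = 0
--     encodeMinus = 0
--     for string in inputStrings:
--         nextCodeDiff , nextEncodeDiff = codeMinusString(string)
--         codeMinus += nextCodeDiff
--         encodeMinus += nextEncodeDiff
--     return codeMinus , encodeMinus
-- ===== SOURCE B (Python) =====
-- def _diffs(s):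
--     L = len(s) - 1 if s.endswith("\n") else len(s)
--     dp = [0] * (L + 3)
--     for i in range(L - 2, 0, -1):
--         step = (4 if s[i + 1] == 'x' else 2) if s[i] == '\\' else 1
--         dp[i] = 1 + dp[i + step]
--     e = sum(1 for ch in s if ch in ('"', '\\'))
--     if L > 0 and s[0] == '"':
--         e += 1
--     if L > 1 and s[L - 1] == '"':
--         e += 1
--     return L - dp[1], e
--
--
-- def totalDiff(inputStrings):
--     pairs = [_diffs(s) for s in inputStrings]
--     return sum(c for c, _ in pairs), sum(e for _, e in pairs)
-- ===== Notes on version B (the rewrite author's own statement) =====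
-- stated objective: alternative
-- what changed: A's single interleaved two-index while loop is replaced by a right-to-left dynamic-programming table dp[i] = decoded chars from position i (read off at dp[1]) plus a one-pass count of escape-needing characters with explicit boundary-quote bonuses for the encode diff.
import Mathlib
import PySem

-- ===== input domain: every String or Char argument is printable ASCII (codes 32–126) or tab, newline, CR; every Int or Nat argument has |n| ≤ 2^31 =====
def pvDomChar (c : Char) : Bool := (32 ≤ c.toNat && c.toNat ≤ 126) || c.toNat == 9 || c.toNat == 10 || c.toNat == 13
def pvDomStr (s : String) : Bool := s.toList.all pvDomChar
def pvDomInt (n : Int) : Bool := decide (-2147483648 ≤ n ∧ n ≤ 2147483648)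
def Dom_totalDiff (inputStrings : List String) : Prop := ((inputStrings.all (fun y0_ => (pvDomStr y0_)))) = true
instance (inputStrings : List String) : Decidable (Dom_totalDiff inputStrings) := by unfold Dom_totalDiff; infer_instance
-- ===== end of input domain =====

-- B replaces A's interleaved two-index while loop by a right-to-left DP table for the decode
-- diff and a one-pass escape-character count plus boundary-quote bonuses for the encode diff;
-- objective: alternative (same cost, different algorithm).

-- ===== PORT A =====
-- A's while loop runs exactly codeLength iterations (encodeIndex += 1 each time); fuel is that count.
-- Indexing uses pyGetD: every access A performs is in range on the admitted inputs (Pre_ excludes "").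
def cmsALoop (cs : List Char) (L : Int) (strLen encodeLength codeIndex encodeIndex : Int) : Nat → Int × Int
  | 0 => (strLen, encodeLength)
  | f + 1 =>
    if encodeIndex < L then
      let strLen' := if codeIndex < L - 1 then strLen + 1 else strLen
      let codeIndex' :=
        if codeIndex < L - 1 then
          (if PySem.List.pyGetD cs codeIndex ' ' = '\\' then
            (if PySem.List.pyGetD cs (codeIndex + 1) ' ' = 'x' then codeIndex + 4 else codeIndex + 2)
          else codeIndex + 1)
        else codeIndex
      let encodeLength' :=
        if PySem.List.pyGetD cs encodeIndex ' ' = '"' then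
          (if encodeIndex = 0 ∨ encodeIndex = L - 1 then encodeLength + 3 else encodeLength + 2)
        else if PySem.List.pyGetD cs encodeIndex ' ' = '\\' then encodeLength + 2
        else encodeLength + 1
      cmsALoop cs L strLen' encodeLength' codeIndex' (encodeIndex + 1) f
    else (strLen, encodeLength)

def codeMinusStringA (string : String) : Int × Int :=
  let cs := string.toList
  let L : Int := if PySem.List.pyGetD cs (-1) ' ' = '\n' then (cs.length : Int) - 1 else (cs.length : Int)
  let r := cmsALoop cs L 0 0 1 0 L.toNat
  (L - r.1, r.2 - L)

def totalDiff (inputStrings : List String) : Int × Int :=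
  inputStrings.foldl
    (fun acc s =>
      let p := codeMinusStringA s
      (acc.1 + p.1, acc.2 + p.2))
    (0, 0)

-- ===== PORT B =====
-- B's DP loop: 'for i in range(L-2, 0, -1): dp[i] = 1 + dp[i+step]'; the descending range is
-- rendered as a counter recursion with fuel = number of iterations.
def dpLoopB (cs : List Char) (dp : List Int) (i : Int) : Nat → List Int
  | 0 => dp
  | f + 1 =>
    if 1 ≤ i then
      let step : Int :=
        if PySem.List.pyGetD cs i ' ' = '\\' then
          (if PySem.List.pyGetD cs (i + 1) ' ' = 'x' then 4 else 2)
        else 1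
      dpLoopB cs (dp.set i.toNat (1 + dp.getD (i + step).toNat 0)) (i - 1) f
    else dp

def codeMinusStringB (string : String) : Int × Int :=
  let cs := string.toList
  let L : Int := if PySem.Str.endswith string "\n" then (cs.length : Int) - 1 else (cs.length : Int)
  let dp := dpLoopB cs (List.replicate (L + 3).toNat 0) (L - 2) (L - 2).toNat
  let dec := dp.getD (1 : Nat) 0
  let em : Int := (cs.countP (fun ch => ch == '"' || ch == '\\') : Int)
  let em := if 0 < L ∧ PySem.List.pyGetD cs 0 ' ' = '"' then em + 1 else em
  let em := if 1 < L ∧ PySem.List.pyGetD cs (L - 1) ' ' = '"' then em + 1 else em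
  (L - dec, em)

def totalDiff_alt (inputStrings : List String) : Int × Int :=
  let pairs := inputStrings.map codeMinusStringB
  ((pairs.map (fun p => p.1)).sum, (pairs.map (fun p => p.2)).sum)

-- ===== PRECONDITION & SPEC =====
-- Pre_ excludes exactly the empty string, on which A's string[-1] raises IndexError.
def Pre_totalDiff (inputStrings : List String) : Prop := ∀ s ∈ inputStrings, s ≠ ""
instance (inputStrings : List String) : Decidable (Pre_totalDiff inputStrings) := by
  unfold Pre_totalDiff; infer_instance

def pvWitness_totalDiff : List String := ["\"a\\x27b\"\n", "\"\\\\\"", "\""]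

def Spec_totalDiff (inputStrings : List String) (out : Int × Int) : Prop := out = totalDiff_alt inputStrings
instance (inputStrings : List String) (out : Int × Int) : Decidable (Spec_totalDiff inputStrings out) := by unfold Spec_totalDiff; infer_instance

-- ===== CLAIM (what is proved, stated in full; the proofs are below) =====
def Claim_equal_totalDiff : Prop := ∀ (inputStrings : List String), Dom_totalDiff inputStrings → Pre_totalDiff inputStrings → Spec_totalDiff inputStrings (totalDiff inputStrings)

-- ===== LEMMAS AND PROOFS =====

-- proof-side cursor count: the number of decoded characters starting at index i (A's strLen
-- from codeIndex = i); both the A-loop and B's DP table are reduced to this function.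
def curCount (cs : List Char) (L : Int) (i d : Int) : Nat → Int
  | 0 => d
  | f + 1 =>
    if i < L - 1 then
      let i' :=
        if PySem.List.pyGetD cs i ' ' = '\\' then
          (if PySem.List.pyGetD cs (i + 1) ' ' = 'x' then i + 4 else i + 2)
        else i + 1
      curCount cs L i' (d + 1) f
    else d

-- remaining encode-diff contribution of indices [eI, L): one unit per index, one more per
-- escape-needing character, plus the boundary-quote bonuses still ahead.
def encRest (cs : List Char) (L eI : Int) : Int :=
  (L - eI)
    + (((cs.take L.toNat).drop eI.toNat).countP (fun ch => ch == '"' || ch == '\\') : Int)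
    + (if eI = 0 then if 0 < L then if cs.getD 0 ' ' = '"' then 1 else 0 else 0 else 0)
    + (if eI < L then if 1 < L then if cs.getD (L.toNat - 1) ' ' = '"' then 1 else 0 else 0 else 0)

lemma encRest_self (cs : List Char) (L : Int) (h0 : 0 ≤ L) : encRest cs L L = 0 := by
  unfold encRest
  rw [List.drop_eq_nil_of_le (by simp)]
  simp only [List.countP_nil]
  split_ifs <;> omega

lemma encRest_step (cs : List Char) (L eI : Int)
    (hlen : L ≤ (cs.length : Int)) (h0 : 0 ≤ eI) (hlt : eI < L) :
    encRest cs L eI =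
      (if PySem.List.pyGetD cs eI ' ' = '"' then
        (if eI = 0 ∨ eI = L - 1 then 3 else 2)
      else if PySem.List.pyGetD cs eI ' ' = '\\' then 2 else 1) + encRest cs L (eI + 1) := by
  have hklen : eI < (cs.length : Int) := by omega
  have htake : eI.toNat < (cs.take L.toNat).length := by
    rw [List.length_take]; omega
  have hget : PySem.List.pyGetD cs eI ' ' = cs[eI.toNat]'(by omega) :=
    PySem.List.pyGetD_eq_getElem cs ' ' h0 hklen
  have hsucc : (eI + 1).toNat = eI.toNat + 1 := by omega
  unfold encRest
  rw [List.drop_eq_getElem_cons htake, List.getElem_take, List.countP_cons, hsucc, hget]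
  push_cast
  by_cases he0 : eI = 0
  · have hg0 : cs.getD 0 ' ' = cs[eI.toNat]'(by omega) := by
      rw [List.getD_eq_getElem cs ' ' (by omega)]; congr 1; omega
    rw [hg0]
    by_cases hq : cs[eI.toNat]'(by omega) = '"'
    · simp only [hq]; norm_num; split_ifs <;> first | omega | tauto
    · by_cases hb : cs[eI.toNat]'(by omega) = '\\'
      · simp only [hb]; norm_num [hq]; split_ifs <;> first | omega | tauto
      · simp only [beq_iff_eq, hq, hb]; norm_num; split_ifs <;> first | omega | tauto
  · by_cases hel : eI = L - 1
    · have hgl : cs.getD (L.toNat - 1) ' ' = cs[eI.toNat]'(by omega) := by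
        rw [List.getD_eq_getElem cs ' ' (by omega)]; congr 1; omega
      rw [hgl]
      by_cases hq : cs[eI.toNat]'(by omega) = '"'
      · simp only [hq]; norm_num; split_ifs <;> first | omega | tauto
      · by_cases hb : cs[eI.toNat]'(by omega) = '\\'
        · simp only [hb]; norm_num [hq]; split_ifs <;> first | omega | tauto
        · simp only [beq_iff_eq, hq, hb]; norm_num; split_ifs <;> first | omega | tauto
    · by_cases hq : cs[eI.toNat]'(by omega) = '"'
      · simp only [hq]; norm_num; split_ifs <;> first | omega | tauto
      · by_cases hb : cs[eI.toNat]'(by omega) = '\\'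
        · simp only [hb]; norm_num [hq]; split_ifs <;> first | omega | tauto
        · simp only [beq_iff_eq, hq, hb]; norm_num; split_ifs <;> first | omega | tauto

lemma cur_stop (cs : List Char) (L i d : Int) (h : ¬ i < L - 1) :
    ∀ f, curCount cs L i d f = d := by
  intro f; cases f <;> simp [curCount, h]

lemma cur_shift (cs : List Char) (L : Int) :
    ∀ f (i d : Int), curCount cs L i d f = d + curCount cs L i 0 f := by
  intro f
  induction f with
  | zero => intro i d; simp [curCount]
  | succ f ih =>
    intro i d
    by_cases h : i < L - 1
    · simp only [curCount, h, if_true]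
      rw [ih _ (d + 1), ih _ (0 + 1)]
      ring
    · simp [curCount, h]

lemma cur_fuel (cs : List Char) (L : Int) :
    ∀ f g (i d : Int), (L - 1 - i).toNat ≤ f → (L - 1 - i).toNat ≤ g →
      curCount cs L i d f = curCount cs L i d g := by
  intro f
  induction f with
  | zero =>
    intro g i d hf hg
    have h : ¬ i < L - 1 := by omega
    rw [cur_stop cs L i d h g]; simp [curCount]
  | succ f ih =>
    intro g i d hf hg
    by_cases h : i < L - 1
    · obtain ⟨g', rfl⟩ : ∃ g', g = g' + 1 := ⟨g - 1, by omega⟩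
      simp only [curCount, h, if_true]
      apply ih
      · split_ifs <;> omega
      · split_ifs <;> omega
    · rw [cur_stop cs L i d h, cur_stop cs L i d h]

-- the DP value at index i: decoded count starting at i
def Fdec (cs : List Char) (L i : Int) : Int := curCount cs L i 0 L.toNat

lemma Fdec_stop (cs : List Char) (L i : Int) (h : ¬ i < L - 1) : Fdec cs L i = 0 :=
  cur_stop cs L i 0 h L.toNat

lemma Fdec_step (cs : List Char) (L i : Int) (h1 : 1 ≤ i) (h : i < L - 1) :
    Fdec cs L i =
      1 + Fdec cs L
        (if PySem.List.pyGetD cs i ' ' = '\\' then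
          (if PySem.List.pyGetD cs (i + 1) ' ' = 'x' then i + 4 else i + 2)
        else i + 1) := by
  obtain ⟨f, hf⟩ : ∃ f, L.toNat = f + 1 := ⟨L.toNat - 1, by omega⟩
  unfold Fdec
  conv_lhs => rw [hf]
  simp only [curCount, h, if_true]
  rw [cur_shift]
  have hb : curCount cs L
      (if PySem.List.pyGetD cs i ' ' = '\\' then
        (if PySem.List.pyGetD cs (i + 1) ' ' = 'x' then i + 4 else i + 2)
      else i + 1) 0 f
      = curCount cs L
      (if PySem.List.pyGetD cs i ' ' = '\\' then
        (if PySem.List.pyGetD cs (i + 1) ' ' = 'x' then i + 4 else i + 2)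
      else i + 1) 0 L.toNat := by
    apply cur_fuel
    · split_ifs <;> omega
    · split_ifs <;> omega
  rw [hb]
  ring

lemma loopAB (cs : List Char) (L : Int) (hlen : L ≤ (cs.length : Int)) :
    ∀ f (sL eL cI eI : Int), 0 ≤ eI → eI ≤ L → f = (L - eI).toNat →
      (eI + 1 ≤ cI ∨ L - 1 ≤ cI) →
      ∀ fB, (L - 1 - cI).toNat ≤ fB →
      cmsALoop cs L sL eL cI eI f = (curCount cs L cI sL fB, eL + encRest cs L eI) := by
  intro f
  induction f with
  | zero =>
    intro sL eL cI eI h0 hle hf hinv fB hfB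
    have heq : eI = L := by omega
    rw [cur_stop cs L cI sL (by omega) fB]
    simp [cmsALoop, heq, encRest_self cs L (by omega)]
  | succ f ih =>
    intro sL eL cI eI h0 hle hf hinv fB hfB
    have hlt : eI < L := by omega
    rw [encRest_step cs L eI hlen h0 hlt]
    by_cases hc : cI < L - 1
    · obtain ⟨g, rfl⟩ : ∃ g, fB = g + 1 := ⟨fB - 1, by omega⟩
      simp only [cmsALoop, curCount, hlt, hc, if_true]
      rw [ih _ _ _ (eI + 1) (by omega) (by omega) (by omega) (by split_ifs <;> omega) g
            (by split_ifs <;> omega)]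
      simp only [Prod.mk.injEq]
      refine ⟨trivial, ?_⟩
      split_ifs <;> ring
    · simp only [cmsALoop, hlt, hc, if_true, if_false]
      rw [ih sL _ cI (eI + 1) (by omega) (by omega) (by omega) (by omega) fB (by omega)]
      rw [cur_stop cs L cI sL hc fB]
      simp only [Prod.mk.injEq]
      refine ⟨trivial, ?_⟩
      split_ifs <;> ring

lemma suffix_last (t : List Char) (c : Char) (hs : ['\n'] <:+ t ++ [c]) : c = '\n' := by
  obtain ⟨u, hu⟩ := hs
  have h1 : (t ++ [c]).getLast? = some '\n' := by rw [← hu]; exact List.getLast?_concat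
  simp at h1; exact h1

lemma encRest_zero (cs : List Char) (L : Int) (h0 : 0 ≤ L) (hlen : L ≤ (cs.length : Int)) :
    encRest cs L 0 - L =
      ((cs.take L.toNat).countP (fun ch => ch == '"' || ch == '\\') : Int)
        + (if 0 < L ∧ PySem.List.pyGetD cs 0 ' ' = '"' then 1 else 0)
        + (if 1 < L ∧ PySem.List.pyGetD cs (L - 1) ' ' = '"' then 1 else 0) := by
  unfold encRest
  rw [PySem.List.pyGetD_zero cs ' ']
  simp only [Int.toNat_zero, List.drop_zero]
  by_cases h1L : 1 < L
  · have hget : PySem.List.pyGetD cs (L - 1) ' ' = cs.getD (L.toNat - 1) ' ' := by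
      rw [PySem.List.pyGetD_eq_getElem cs ' ' (by omega) (by omega),
        List.getD_eq_getElem cs ' ' (by omega)]
      congr 1; omega
    rw [hget]
    split_ifs <;> first | omega | tauto
  · split_ifs <;> first | omega | tauto

lemma dp_inv (cs : List Char) (L : Int) :
    ∀ f (i : Int) (dp : List Int), i ≤ L - 2 → i.toNat ≤ f →
      dp.length = (L + 3).toNat →
      (∀ j : Int, i < j → j ≤ L + 2 → dp.getD j.toNat 0 = Fdec cs L j) →
      ∀ j : Int, 0 < j → j ≤ L + 2 → (dpLoopB cs dp i f).getD j.toNat 0 = Fdec cs L j := by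
  intro f
  induction f with
  | zero =>
    intro i dp hi hfuel hlen hdp j hj1 hj2
    simp only [dpLoopB]
    exact hdp j (by omega) hj2
  | succ f ih =>
    intro i dp hi hfuel hlen hdp j hj1 hj2
    by_cases hge : 1 ≤ i
    · simp only [dpLoopB, hge, if_true]
      refine ih (i - 1) _ (by omega) (by omega) (by rw [List.length_set]; exact hlen)
        ?_ j hj1 hj2
      intro j' hj'1 hj'2
      by_cases hji : j' = i
      · subst hji
        have hidx : j'.toNat < dp.length := by rw [hlen]; omega
        rw [List.getD_eq_getElem?_getD, List.getElem?_set_self hidx]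
        simp only [Option.getD_some]
        have hstep : (1 : Int) ≤
            (if PySem.List.pyGetD cs j' ' ' = '\\' then
              (if PySem.List.pyGetD cs (j' + 1) ' ' = 'x' then 4 else 2)
            else 1) := by split_ifs <;> omega
        have hstep4 : (if PySem.List.pyGetD cs j' ' ' = '\\' then
              (if PySem.List.pyGetD cs (j' + 1) ' ' = 'x' then (4 : Int) else 2)
            else 1) ≤ 4 := by split_ifs <;> omega
        rw [hdp _ (by omega) (by omega)]
        rw [Fdec_step cs L j' hge (by omega)]
        congr 1
        split_ifs <;> ring_nf
      · have hlt : i < j' := by omega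
        have hne : i.toNat ≠ j'.toNat := by omega
        rw [List.getD_eq_getElem?_getD, List.getElem?_set_ne hne,
          ← List.getD_eq_getElem?_getD]
        exact hdp j' (by omega) hj'2
    · simp only [dpLoopB, hge, if_false]
      exact hdp j (by omega) hj2

lemma cms_eq (s : String) (h : s ≠ "") : codeMinusStringA s = codeMinusStringB s := by
  have hne : s.toList ≠ [] := by
    intro hc
    have h2 := congrArg String.ofList hc
    rw [String.ofList_toList] at h2
    exact h h2
  obtain ⟨t, c, hdec⟩ : ∃ t c, s.toList = t ++ [c] :=
    ⟨s.toList.dropLast, s.toList.getLast hne, (List.dropLast_append_getLast hne).symm⟩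
  unfold codeMinusStringA codeMinusStringB
  have hlast : PySem.List.pyGetD s.toList (-1) ' ' = c := by
    rw [PySem.List.pyGetD_neg_one s.toList ' ' hne]
    simp [hdec]
  have hend : (PySem.Str.endswith s "\n" = true) ↔ (PySem.List.pyGetD s.toList (-1) ' ' = '\n') := by
    rw [PySem.Str.endswith_eq, PySem.Chars.endswith_iff, hlast]
    show ['\n'] <:+ s.toList ↔ _
    constructor
    · intro hs; rw [hdec] at hs; exact suffix_last t c hs
    · intro hc; rw [hdec, hc]; exact ⟨t, rfl⟩
  have hL : (if PySem.Str.endswith s "\n" then ((s.toList.length : Int) - 1) else (s.toList.length : Int))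
      = (if PySem.List.pyGetD s.toList (-1) ' ' = '\n' then ((s.toList.length : Int) - 1) else (s.toList.length : Int)) := by
    by_cases hc : PySem.List.pyGetD s.toList (-1) ' ' = '\n'
    · rw [if_pos (hend.mpr hc), if_pos hc]
    · rw [if_neg (fun hb => hc (hend.mp hb)), if_neg hc]
  simp only [hL]
  set L : Int := if PySem.List.pyGetD s.toList (-1) ' ' = '\n' then ((s.toList.length : Int) - 1) else (s.toList.length : Int) with hLdef
  have hlen1 : 0 < s.toList.length := by
    cases hl : s.toList with
    | nil => exact absurd hl hne
    | cons a l => simp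
  have hL0 : 0 ≤ L := by rw [hLdef]; split_ifs <;> omega
  have hLlen : L ≤ (s.toList.length : Int) := by rw [hLdef]; split_ifs <;> omega
  rw [loopAB s.toList L hLlen L.toNat 0 0 1 0 le_rfl hL0 (by omega) (by omega) L.toNat (by omega)]
  have hdp : (dpLoopB s.toList (List.replicate (L + 3).toNat 0) (L - 2) (L - 2).toNat).getD (1 : Nat) 0
      = Fdec s.toList L 1 := by
    have := dp_inv s.toList L (L - 2).toNat (L - 2) (List.replicate (L + 3).toNat 0)
      (by omega) le_rfl (by simp)
      (fun j hj1 hj2 => by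
        rw [List.getD_eq_getElem?_getD, List.getElem?_replicate]
        have hjn : j.toNat < (L + 3).toNat := by omega
        rw [if_pos hjn]
        exact (Fdec_stop s.toList L j (by omega)).symm)
      1 (by omega) (by omega)
    simpa using this
  simp only [Prod.mk.injEq]
  constructor
  · rw [hdp]; rfl
  · have hcount : ((s.toList.take L.toNat).countP (fun ch => ch == '"' || ch == '\\') : Int)
        = (s.toList.countP (fun ch => ch == '"' || ch == '\\') : Int) := by
      by_cases hc : PySem.List.pyGetD s.toList (-1) ' ' = '\n'
      · have hcn : c = '\n' := by rw [← hlast]; exact hc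
        have hLt : L.toNat = t.length := by
          have : L = (s.toList.length : Int) - 1 := by rw [hLdef, if_pos hc]
          rw [hdec] at this; simp at this; omega
        rw [hdec, hLt]
        simp [List.countP_append, hcn]
      · have hLt : L = (s.toList.length : Int) := by rw [hLdef, if_neg hc]
        rw [hLt, Int.toNat_natCast, List.take_length]
    rw [show (0 : Int) + encRest s.toList L 0 - L = encRest s.toList L 0 - L by ring,
      encRest_zero s.toList L hL0 hLlen, hcount]
    split_ifs <;> ring

theorem totalDiff_fold (l : List String) (h : ∀ s ∈ l, s ≠ "") :
    ∀ a b : Int,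
      l.foldl (fun acc s => let p := codeMinusStringA s; (acc.1 + p.1, acc.2 + p.2)) (a, b) =
        (a + ((l.map codeMinusStringB).map (fun p => p.1)).sum,
         b + ((l.map codeMinusStringB).map (fun p => p.2)).sum) := by
  induction l with
  | nil => intro a b; simp
  | cons s t ih =>
    intro a b
    have hs : s ≠ "" := h s (by simp)
    simp only [List.foldl_cons, List.map_cons, List.sum_cons]
    rw [cms_eq s hs, ih (fun x hx => h x (by simp [hx]))]
    simp [Prod.ext_iff]; constructor <;> ring

-- ===== VERDICT (by name: the statement is the Claim_ definition above) =====
theorem totalDiff_spec : Claim_equal_totalDiff := by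
  intro xs _ hpre
  unfold Spec_totalDiff totalDiff totalDiff_alt
  rw [totalDiff_fold xs hpre 0 0]
  simp
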